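-- pv_equiv track=rewrite | github.com/BKsher/RRM-analyzer | 1024_random_distribution.py | identify_connection_blocks
-- ===== SOURCE A (Python) =====
-- def identify_connection_blocks(connections):
--     if not connections: return []
--     connections = sorted(list(set(connections)))
--     if not connections: return []
--     blocks, current_block = [], [connections[0]]
--     for i in range(1, len(connections)):
--         if connections[i] - connections[i-1] == 1:
--             current_block.append(connections[i])
--         else:
--             blocks.append(current_block)
--             current_block = [connections[i]]
--     blocks.append(current_block)
--     return blocks
-- ===== SOURCE B (Python) =====
-- def identify_connection_blocks(connections):
--     # Group sorted unique values by the constant key v - index: consecutive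
--     # integers share one key, so each dict entry is one run.
--     s = sorted(set(connections))
--     pairs = [(v - i, v) for i, v in enumerate(s)]
--     groups = {}
--     for k, v in pairs:
--         groups[k] = groups.get(k, []) + [v]
--     return list(groups.values())
-- ===== Notes on version B (the rewrite author's own statement) =====
-- stated objective: alternative
-- what changed: Replaces A's explicit previous-element comparison loop over indices with key-based grouping: the sorted unique values are grouped into an insertion-ordered dict keyed by (value - index), so each run of consecutive integers is one dict entry and the result is the dict's values.
import Mathlib
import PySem

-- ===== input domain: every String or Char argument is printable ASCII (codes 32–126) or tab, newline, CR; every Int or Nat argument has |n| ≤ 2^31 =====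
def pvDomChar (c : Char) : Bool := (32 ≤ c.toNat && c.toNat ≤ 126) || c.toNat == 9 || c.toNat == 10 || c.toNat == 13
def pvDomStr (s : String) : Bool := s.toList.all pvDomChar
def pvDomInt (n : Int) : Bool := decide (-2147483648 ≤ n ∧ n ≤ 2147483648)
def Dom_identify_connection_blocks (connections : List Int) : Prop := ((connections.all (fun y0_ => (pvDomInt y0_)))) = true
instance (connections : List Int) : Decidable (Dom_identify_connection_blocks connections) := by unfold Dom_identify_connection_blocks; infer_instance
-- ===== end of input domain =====

-- B replaces A's previous-element comparison loop by grouping the sorted unique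
-- values into a dict keyed by (value - index); objective: alternative decomposition.

-- ===== PORT A =====
def identify_connection_blocks (connections : List Int) : List (List Int) :=
  if connections = [] then [] else
  let c := PySem.List.sorted (PySem.Set.ofList connections) (fun x => x) false
  if c = [] then [] else
  let st := (PySem.List.pyRange 1 (c.length : Int) 1).foldl
    (fun st i =>
      if PySem.List.pyGetD c i 0 - PySem.List.pyGetD c (i - 1) 0 = 1 then
        (st.1, st.2 ++ [PySem.List.pyGetD c i 0])
      else
        (st.1 ++ [st.2], [PySem.List.pyGetD c i 0]))
    (([] : List (List Int)), [PySem.List.pyGetD c 0 0])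
  st.1 ++ [st.2]

-- ===== PORT B =====
def identify_connection_blocks_alt (connections : List Int) : List (List Int) :=
  let s := PySem.List.sorted (PySem.Set.ofList connections) (fun x => x) false
  let pairs := (PySem.List.enumerate s 0).map (fun p => (p.2 - p.1, p.2))
  let groups := pairs.foldl (fun d p => d.modify p.1 [] (· ++ [p.2])) PySem.Dict.empty
  groups.values

-- ===== PRECONDITION & SPEC =====
def Spec_identify_connection_blocks (connections : List Int) (out : List (List Int)) : Prop := out = identify_connection_blocks_alt connections
instance (connections : List Int) (out : List (List Int)) : Decidable (Spec_identify_connection_blocks connections out) := by unfold Spec_identify_connection_blocks; infer_instance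

-- ===== CLAIM (what is proved, stated in full; the proofs are below) =====
def Claim_equal_identify_connection_blocks : Prop := ∀ (connections : List Int), Dom_identify_connection_blocks connections → Spec_identify_connection_blocks connections (identify_connection_blocks connections)

-- ===== LEMMAS AND PROOFS =====

-- reference: split off the maximal run of consecutive successors of p
def takeRun (p : Int) : List Int → (List Int × List Int)
  | [] => ([], [])
  | x :: rest =>
    if x - p = 1 then
      let r := takeRun x rest
      (x :: r.1, r.2)
    else ([], x :: rest)

theorem takeRun_append (p : Int) (u : List Int) :
    (takeRun p u).1 ++ (takeRun p u).2 = u := by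
  induction u generalizing p with
  | nil => rfl
  | cons x rest ih =>
    simp only [takeRun]
    split
    · simpa using ih x
    · rfl

theorem takeRun_snd_length (p : Int) (u : List Int) :
    (takeRun p u).2.length ≤ u.length := by
  have h := congrArg List.length (takeRun_append p u)
  simp at h
  omega

-- the intended result: maximal runs of consecutive integers
def runs : List Int → List (List Int)
  | [] => []
  | a :: t => (a :: (takeRun a t).1) :: runs (takeRun a t).2
termination_by u => u.length
decreasing_by
  have := takeRun_snd_length a t
  simp
  omega

-- A's loop state transformer, structurally on the remaining list
def refLoop (blocks : List (List Int)) (cur : List Int) (p : Int) :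
    List Int → List (List Int) × List Int
  | [] => (blocks, cur)
  | x :: u =>
    if x - p = 1 then refLoop blocks (cur ++ [x]) x u
    else refLoop (blocks ++ [cur]) [x] x u

theorem refLoop_out : ∀ (u : List Int) (blocks : List (List Int)) (cur : List Int) (p : Int),
    (refLoop blocks cur p u).1 ++ [(refLoop blocks cur p u).2]
      = blocks ++ ((cur ++ (takeRun p u).1) :: runs (takeRun p u).2) := by
  intro u
  induction u with
  | nil => intro blocks cur p; simp [refLoop, takeRun, runs]
  | cons x u ih =>
    intro blocks cur p
    by_cases hx : x - p = 1
    · simp only [refLoop, takeRun, if_pos hx]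
      rw [ih]
      simp
    · simp only [refLoop, takeRun, if_neg hx]
      rw [ih, runs]
      simp

-- the index loop of port A computes refLoop on the tail
theorem aloop (c : List Int) : ∀ (u : List Int) (k : Nat) (p : Int)
    (blocks : List (List Int)) (cur : List Int),
    c.drop k = p :: u →
    ((PySem.List.pyRange ((k : Int) + 1) (c.length : Int) 1).foldl
      (fun st i =>
        if PySem.List.pyGetD c i 0 - PySem.List.pyGetD c (i - 1) 0 = 1 then
          (st.1, st.2 ++ [PySem.List.pyGetD c i 0])
        else
          (st.1 ++ [st.2], [PySem.List.pyGetD c i 0])) (blocks, cur))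
      = refLoop blocks cur p u := by
  intro u
  induction u with
  | nil =>
    intro k p blocks cur hd
    have h1 := congrArg List.length hd
    simp [List.length_drop] at h1
    rw [PySem.List.pyRange_one_eq_nil (by omega)]
    simp [refLoop]
  | cons x u ih =>
    intro k p blocks cur hd
    have h1 := congrArg List.length hd
    simp [List.length_drop] at h1
    have hp : getElem? c k = some p := by
      have h := List.getElem?_drop (xs := c) (i := k) (j := 0)
      rw [hd] at h
      simpa using h.symm
    have hx : getElem? c (k+1) = some x := by
      have h := List.getElem?_drop (xs := c) (i := k) (j := 1)
      rw [hd] at h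
      simpa using h.symm
    have hgp : PySem.List.pyGetD c ((k : Int) + 1 - 1) 0 = p := by
      have : ((k : Int) + 1 - 1) = ((k : Nat) : Int) := by ring
      rw [this, PySem.List.pyGetD_natCast, List.getD_eq_getElem?_getD, hp]; rfl
    have hgx : PySem.List.pyGetD c ((k : Int) + 1) 0 = x := by
      have : ((k : Int) + 1) = (((k + 1 : Nat)) : Int) := by push_cast; ring
      rw [this, PySem.List.pyGetD_natCast, List.getD_eq_getElem?_getD, hx]; rfl
    rw [PySem.List.pyRange_one_cons (by omega)]
    have hd' : c.drop (k + 1) = x :: u := by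
      rw [← List.tail_drop, hd]; rfl
    have ihk := ih (k + 1) x
    simp only [List.foldl_cons, hgp, hgx]
    by_cases hcond : x - p = 1
    · rw [if_pos hcond]
      have : ((k : Int) + 1 + 1) = (((k + 1 : Nat) : Int) + 1) := by push_cast; ring
      rw [this, ihk blocks (cur ++ [x]) hd']
      simp [refLoop, hcond]
    · rw [if_neg hcond]
      have : ((k : Int) + 1 + 1) = (((k + 1 : Nat) : Int) + 1) := by push_cast; ring
      rw [this, ihk (blocks ++ [cur]) [x] hd']
      simp [refLoop, hcond]

-- A equals runs on the sorted deduplicated list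
theorem A_eq_runs (connections : List Int) :
    identify_connection_blocks connections
      = runs (PySem.List.sorted (PySem.Set.ofList connections) (fun x => x) false) := by
  unfold identify_connection_blocks
  by_cases hc : connections = []
  · rw [if_pos hc]
    have h1 : PySem.List.sorted (PySem.Set.ofList ([] : List Int)) (fun x => x) false = [] := rfl
    rw [hc, h1, runs]
  · rw [if_neg hc]
    set c := PySem.List.sorted (PySem.Set.ofList connections) (fun x => x) false with hcdef
    have hne : c ≠ [] := by
      intro h
      have hperm := PySem.List.sorted_perm (PySem.Set.ofList connections) (fun x => x) false
      rw [← hcdef, h] at hperm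
      have : PySem.Set.ofList connections = [] := hperm.symm.eq_nil
      obtain ⟨y, t, rfl⟩ := List.exists_cons_of_ne_nil hc
      have : y ∈ PySem.Set.ofList (y :: t) := by
        rw [PySem.Set.mem_ofList]; simp
      simp_all
    rw [if_neg hne]
    obtain ⟨p, u, hcu⟩ := List.exists_cons_of_ne_nil hne
    have hd0 : c.drop 0 = p :: u := by simp [hcu]
    have hstart : PySem.List.pyGetD c 0 0 = p := by
      have : (0 : Int) = ((0 : Nat) : Int) := by norm_num
      rw [this, PySem.List.pyGetD_natCast]
      simp [hcu]
    have hloop := aloop c u 0 p [] [PySem.List.pyGetD c 0 0] hd0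
    simp only [Nat.cast_zero, zero_add] at hloop
    rw [hstart] at hloop
    simp only [hstart]
    rw [hloop, refLoop_out, hcu, runs]
    simp

-- ===== B side =====

def genPairs (n : Int) (u : List Int) : List (Int × Int) :=
  (PySem.List.enumerate u n).map (fun p => (p.2 - p.1, p.2))

theorem genPairs_nil (n : Int) : genPairs n [] = [] := rfl

theorem genPairs_cons (n x : Int) (u : List Int) :
    genPairs n (x :: u) = (x - n, x) :: genPairs (n + 1) u := by
  simp [genPairs, PySem.List.enumerate_cons]

def F (ps : List (Int × Int)) : List (List Int) :=
  (PySem.Set.ofList (ps.map (·.1))).map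
    (fun k => (ps.filter (fun q => q.1 == k)).map (·.2))

theorem B_eq_F (connections : List Int) :
    identify_connection_blocks_alt connections
      = F (genPairs 0 (PySem.List.sorted (PySem.Set.ofList connections) (fun x => x) false)) := by
  unfold identify_connection_blocks_alt F genPairs
  set s := PySem.List.sorted (PySem.Set.ofList connections) (fun x => x) false
  set ps := (PySem.List.enumerate s 0).map (fun p => (p.2 - p.1, p.2)) with hps
  have hkeys : (ps.foldl (fun d p => d.modify p.1 [] (· ++ [p.2])) PySem.Dict.empty).keys
      = PySem.Set.ofList (ps.map (·.1)) := by
    rw [PySem.Dict.keys_foldl_modify_key]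
    simp [PySem.Set.update_nil_left]
  have hnd : (ps.foldl (fun d p => d.modify p.1 [] (· ++ [p.2])) PySem.Dict.empty).keys.Nodup := by
    rw [hkeys]; exact PySem.Set.nodup_ofList _
  rw [PySem.Dict.values_eq_map_keys _ hnd ([] : List Int), hkeys]
  apply List.map_congr_left
  intro k hk
  rw [PySem.Dict.getD_foldl_modify_append]
  simp

theorem keys_lb : ∀ (u : List Int) (x m : Int), List.Pairwise (· < ·) (x :: u) →
    ∀ q ∈ genPairs m (x :: u), x - m ≤ q.1 := by
  intro u
  induction u with
  | nil =>
    intro x m _ q hq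
    simp [genPairs_cons, genPairs_nil] at hq
    simp [hq]
  | cons y u ih =>
    intro x m h q hq
    rw [genPairs_cons] at hq
    rcases List.mem_cons.mp hq with h1 | h1
    · simp [h1]
    · have hxy : x < y := (List.pairwise_cons.mp h).1 _ List.mem_cons_self
      have := ih y (m + 1) (List.pairwise_cons.mp h).2 q h1
      omega

theorem run_split : ∀ (u : List Int) (p n : Int), List.Pairwise (· < ·) (p :: u) →
    genPairs (n + 1) u
      = (takeRun p u).1.map (fun v => (p - n, v))
        ++ genPairs (n + 1 + ((takeRun p u).1.length : Int)) (takeRun p u).2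
    ∧ ∀ q ∈ genPairs (n + 1 + ((takeRun p u).1.length : Int)) (takeRun p u).2, p - n < q.1 := by
  intro u
  induction u with
  | nil => intro p n _; simp [takeRun, genPairs_nil]
  | cons x u ih =>
    intro p n h
    have hpx : p < x := (List.pairwise_cons.mp h).1 _ List.mem_cons_self
    have htail : List.Pairwise (· < ·) (x :: u) := (List.pairwise_cons.mp h).2
    by_cases hx : x - p = 1
    · obtain ⟨ih1, ih2⟩ := ih x (n + 1) htail
      have hkey : x - (n + 1) = p - n := by omega
      constructor
      · rw [genPairs_cons, ih1]
        simp only [takeRun, if_pos hx, List.map_cons, List.length_cons]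
        rw [hkey]
        have hoff : n + 1 + (((takeRun x u).1.length + 1 : Nat) : Int)
            = n + 1 + 1 + ((takeRun x u).1.length : Int) := by push_cast; ring
        rw [hoff]
        simp
      · intro q hq
        simp only [takeRun, if_pos hx, List.length_cons] at hq
        have hoff : n + 1 + (((takeRun x u).1.length + 1 : Nat) : Int)
            = n + 1 + 1 + ((takeRun x u).1.length : Int) := by push_cast; ring
        rw [hoff] at hq
        have := ih2 q hq
        omega
    · constructor
      · simp [takeRun, if_neg hx]
      · intro q hq
        simp only [takeRun, if_neg hx, List.length_nil, Nat.cast_zero, add_zero] at hq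
        have := keys_lb u x (n + 1) htail q hq
        omega

-- Set.ofList helpers
theorem foldl_add_cons (K : Int) : ∀ (ks s : List Int), K ∉ ks →
    ks.foldl PySem.Set.add (K :: s) = K :: ks.foldl PySem.Set.add s := by
  intro ks
  induction ks with
  | nil => intro s _; rfl
  | cons y ks ih =>
    intro s hK
    have hyK : y ≠ K := by intro h; exact hK (by simp [h])
    have hstep : PySem.Set.add (K :: s) y = K :: PySem.Set.add s y := by
      have hbeq : (y == K) = false := beq_eq_false_iff_ne.mpr hyK
      simp only [PySem.Set.add, PySem.Set.contains, List.contains_cons, hbeq, Bool.false_or]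
      by_cases hy : y ∈ s <;> simp [hy]
    rw [List.foldl_cons, List.foldl_cons, hstep]
    exact ih _ (by intro h; exact hK (by simp [h]))

theorem ofList_const_append (K : Int) : ∀ (m : Nat) (ks : List Int), K ∉ ks →
    PySem.Set.ofList (K :: List.replicate m K ++ ks) = K :: PySem.Set.ofList ks := by
  intro m ks hK
  have h1 : PySem.Set.ofList (K :: List.replicate m K ++ ks)
      = (List.replicate m K ++ ks).foldl PySem.Set.add [K] := by
    rw [PySem.Set.ofList_eq_foldl]
    simp [PySem.Set.add, PySem.Set.contains]
  rw [h1, List.foldl_append]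
  clear h1
  have h2 : (List.replicate m K).foldl PySem.Set.add [K] = [K] := by
    induction m with
    | zero => rfl
    | succ m ihm =>
      rw [List.replicate_succ, List.foldl_cons]
      have : PySem.Set.add [K] K = [K] := by
        simp [PySem.Set.add, PySem.Set.contains]
      rw [this, ihm]
  rw [h2, foldl_add_cons K ks [] hK, PySem.Set.ofList_eq_foldl]

theorem F_genPairs : ∀ (s : List Int) (n : Int), List.Pairwise (· < ·) s →
    F (genPairs n s) = runs s
  | [], n, _ => by simp [genPairs_nil, F, PySem.Set.ofList, runs, PySem.Set.empty]
  | a :: t, n, h => by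
    have htail : List.Pairwise (· < ·) t := h.of_cons
    obtain ⟨hsplit, hgt⟩ := run_split t a n h
    set r := (takeRun a t).1 with hr
    set rest := (takeRun a t).2 with hrest
    set ps2 := genPairs (n + 1 + (r.length : Int)) rest with hps2
    have hK : a - n ∉ ps2.map (·.1) := by
      intro hmem
      obtain ⟨q, hq, hq1⟩ := List.mem_map.mp hmem
      have := hgt q hq
      omega
    have hchain_rest : List.Pairwise (· < ·) rest := by
      have hsub : rest.Sublist t := by
        rw [← takeRun_append a t, ← hr, ← hrest]
        exact List.sublist_append_right r rest
      exact List.Pairwise.sublist hsub htail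
    have hrec : F ps2 = runs rest :=
      F_genPairs rest (n + 1 + (r.length : Int)) hchain_rest
    have hgen : genPairs n (a :: t) = (a - n, a) :: r.map (fun v => (a - n, v)) ++ ps2 := by
      rw [genPairs_cons, hsplit]
      rfl
    have hkeylist : (genPairs n (a :: t)).map (·.1)
        = (a - n) :: List.replicate r.length (a - n) ++ ps2.map (·.1) := by
      rw [hgen]
      simp [List.map_map]
    have hset : PySem.Set.ofList ((genPairs n (a :: t)).map (·.1))
        = (a - n) :: PySem.Set.ofList (ps2.map (·.1)) := by
      rw [hkeylist]
      exact ofList_const_append _ _ _ hK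
    have hfilterK : ((genPairs n (a :: t)).filter (fun q => q.1 == (a - n))).map (·.2)
        = a :: r := by
      rw [hgen, List.cons_append, List.filter_cons, List.filter_append]
      simp only [beq_self_eq_true, if_pos]
      have h1 : (r.map (fun v => (a - n, v))).filter (fun q => q.1 == (a - n))
          = r.map (fun v => (a - n, v)) := by
        apply List.filter_eq_self.mpr
        intro q hq
        obtain ⟨v, _, rfl⟩ := List.mem_map.mp hq
        simp
      have h2 : ps2.filter (fun q => q.1 == (a - n)) = [] := by
        apply List.filter_eq_nil_iff.mpr
        intro q hq
        have := hgt q hq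
        simp
        omega
      rw [h1, h2]
      simp [List.map_map]
    have hfilter2 : ∀ k ∈ PySem.Set.ofList (ps2.map (·.1)),
        (genPairs n (a :: t)).filter (fun q => q.1 == k) = ps2.filter (fun q => q.1 == k) := by
      intro k hk
      have hkgt : a - n < k := by
        obtain ⟨q, hq, hq1⟩ := List.mem_map.mp ((PySem.Set.mem_ofList _ _).mp hk)
        have := hgt q hq
        omega
      rw [hgen, List.cons_append, List.filter_cons, List.filter_append]
      have h1 : ((a - n, a).1 == k) = false := by simp; omega
      have h2 : (r.map (fun v => (a - n, v))).filter (fun q => q.1 == k) = [] := by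
        apply List.filter_eq_nil_iff.mpr
        intro q hq
        obtain ⟨v, _, rfl⟩ := List.mem_map.mp hq
        simp
        omega
      simp [h1, h2]
    unfold F
    rw [hset, List.map_cons, hfilterK, runs, ← hr, ← hrest]
    congr 1
    rw [← hrec]
    unfold F
    apply List.map_congr_left
    intro k hk
    rw [hfilter2 k hk]
termination_by s _ _ => s.length
decreasing_by
  have := takeRun_snd_length a t
  simp
  omega

-- ===== VERDICT (by name: the statement is the Claim_ definition above) =====
theorem identify_connection_blocks_spec : Claim_equal_identify_connection_blocks := by
  intro connections _
  unfold Spec_identify_connection_blocks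
  rw [A_eq_runs, B_eq_F]
  have hchain : List.Pairwise (· < ·)
      (PySem.List.sorted (PySem.Set.ofList connections) (fun x => x) false) := by
    exact PySem.List.sorted_ofList_pairwise_lt (xs := connections)
  rw [F_genPairs _ 0 hchain]
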